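-- pv_equiv track=rewrite | github.com/PhiStCZ/cryptext | cryptext/alphabet/alphabet.py | _check_valid_symbols
-- ===== SOURCE A (Python) =====
-- def _check_valid_symbols(symbols: tuple[str, ...]) -> bool:
--     if len(symbols) == 0: return False
--     for s in symbols:
--         if len(s) == 0: return False
--     for i in range(len(symbols)):
--         for j in range(i + 1, len(symbols)):
--             if symbols[i] == symbols[j]: return False
--     return True
-- ===== SOURCE B (Python) =====
-- def _check_valid_symbols(symbols: tuple[str, ...]) -> bool:
--     if len(symbols) == 0: return False
--     for s in symbols:
--         if len(s) == 0: return False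
--     ordered = sorted(symbols)
--     for i in range(len(ordered) - 1):
--         if ordered[i] == ordered[i + 1]: return False
--     return True
-- ===== Notes on version B (the rewrite author's own statement) =====
-- stated objective: alternative
-- what changed: Duplicate detection replaced: instead of the nested O(n^2) pairwise scan, B sorts a copy of the symbols and makes one linear pass comparing adjacent elements.
import Mathlib
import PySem

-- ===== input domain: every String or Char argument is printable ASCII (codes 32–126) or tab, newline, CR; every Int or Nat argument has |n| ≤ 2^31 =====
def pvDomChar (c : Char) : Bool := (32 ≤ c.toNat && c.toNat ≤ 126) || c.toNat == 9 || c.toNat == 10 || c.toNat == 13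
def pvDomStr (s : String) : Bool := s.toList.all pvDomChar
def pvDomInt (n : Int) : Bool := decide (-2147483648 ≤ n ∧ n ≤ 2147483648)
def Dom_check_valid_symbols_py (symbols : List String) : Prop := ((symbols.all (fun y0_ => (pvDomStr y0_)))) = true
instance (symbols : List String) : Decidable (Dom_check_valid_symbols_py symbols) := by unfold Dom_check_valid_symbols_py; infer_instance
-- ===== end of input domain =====

-- B replaces A's nested pairwise duplicate scan by sort-then-adjacent-compare (alternative algorithm).
-- ===== PORT A =====
-- first loop: `for s in symbols: if len(s) == 0: return False`
def pyAnyEmpty : List String → Bool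
  | [] => false
  | s :: rest => if s.length == 0 then true else pyAnyEmpty rest

-- nested loops: for each i, scan j in i+1..n for an equal symbol (early return False)
def pyPairScan : List String → Bool
  | [] => true
  | s :: rest => if rest.any (fun t => s == t) then false else pyPairScan rest

def check_valid_symbols_py (symbols : List String) : Bool :=
  if symbols.length == 0 then false
  else if pyAnyEmpty symbols then false
  else pyPairScan symbols

-- ===== PORT B =====
-- `for i in range(len(ordered) - 1): if ordered[i] == ordered[i+1]: return False`
def adjDistinct : List String → Bool
  | [] => true
  | [_] => true
  | a :: b :: rest => if a == b then false else adjDistinct (b :: rest)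

def check_valid_symbols_py_alt (symbols : List String) : Bool :=
  if symbols.length == 0 then false
  else if symbols.any (fun s => s.length == 0) then false
  else adjDistinct (PySem.List.sorted symbols (fun x => x) false)

-- ===== PRECONDITION & SPEC =====
def Spec_check_valid_symbols_py (symbols : List String) (out : Bool) : Prop := out = check_valid_symbols_py_alt symbols
instance (symbols : List String) (out : Bool) : Decidable (Spec_check_valid_symbols_py symbols out) := by unfold Spec_check_valid_symbols_py; infer_instance

-- ===== CLAIM (what is proved, stated in full; the proofs are below) =====
def Claim_equal_check_valid_symbols_py : Prop := ∀ (symbols : List String), Dom_check_valid_symbols_py symbols → Spec_check_valid_symbols_py symbols (check_valid_symbols_py symbols)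

-- ===== LEMMAS AND PROOFS =====


lemma pyAnyEmpty_eq_any (l : List String) : pyAnyEmpty l = l.any (fun s => s.length == 0) := by
  induction l with
  | nil => rfl
  | cons s rest ih =>
    simp only [pyAnyEmpty, List.any_cons]
    by_cases h : s.length = 0 <;> simp [h, ih]

lemma pyPairScan_eq_true_iff (l : List String) : pyPairScan l = true ↔ l.Nodup := by
  induction l with
  | nil => simp [pyPairScan]
  | cons s rest ih =>
    simp only [pyPairScan, List.nodup_cons]
    by_cases h : s ∈ rest
    · have : rest.any (fun t => s == t) = true := by
        simp only [List.any_eq_true]; exact ⟨s, h, by simp⟩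
      simp [this, h]
    · have : rest.any (fun t => s == t) = false := by
        simp only [List.any_eq_false]; intro t ht hst
        exact h (by simpa using (beq_iff_eq.mp hst) ▸ ht)
      simp [this, h, ih]

lemma adjDistinct_sorted_iff (l : List String) (hp : l.Pairwise (· ≤ ·)) :
    adjDistinct l = true ↔ l.Nodup := by
  induction l with
  | nil => simp [adjDistinct]
  | cons a t ih =>
    cases t with
    | nil => simp [adjDistinct]
    | cons b rest =>
      rcases List.pairwise_cons.mp hp with ⟨hab, hrest⟩
      by_cases h : a = b
      · subst h
        simp [adjDistinct, List.nodup_cons]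
      · have hlt : a < b := lt_of_le_of_ne (hab b (by simp)) h
        have hnotmem : a ∉ b :: rest := by
          intro hm
          rcases List.mem_cons.mp hm with h1 | h1
          · exact h h1
          · rcases List.pairwise_cons.mp hrest with ⟨hb, _⟩
            exact absurd (lt_of_lt_of_le hlt (hb a h1)) (lt_irrefl a)
        simp only [adjDistinct]
        rw [if_neg (by simp [h]), ih hrest, List.nodup_cons]
        simp [hnotmem]

-- ===== VERDICT (by name: the statement is the Claim_ definition above) =====
theorem check_valid_symbols_py_spec : Claim_equal_check_valid_symbols_py := by
  intro symbols _
  unfold Spec_check_valid_symbols_py check_valid_symbols_py check_valid_symbols_py_alt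
  rw [pyAnyEmpty_eq_any]
  by_cases h0 : symbols.length = 0
  · simp [h0]
  · by_cases he : symbols.any (fun s => s.length == 0)
    · simp [h0, he]
    · simp only [h0, he, beq_iff_eq, if_false, Bool.false_eq_true]
      have hperm := PySem.List.sorted_perm symbols (fun x => x) false
      have hpair : (PySem.List.sorted symbols (fun x => x) false).Pairwise (· ≤ ·) := by
        simpa using PySem.List.sorted_pairwise symbols (fun x => x)
      rw [Bool.eq_iff_iff, pyPairScan_eq_true_iff,
        adjDistinct_sorted_iff _ hpair, hperm.nodup_iff]
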